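-- pv_equiv track=rewrite | github.com/erturkmemmedli/Hacker-Rank-Solutions | Data Structures/Stacks/waiter.py | waiter
-- ===== SOURCE A (Python) =====
-- def prime_numbers(n):
--     primes = []
--     non_primes = set()
--
--     for i in range(2, n + 1):
--         if i not in non_primes:
--             primes.append(i)
--             for j in range(1, n + 1):
--                 if i * j > n:
--                     break
--                 non_primes.add(i * j)
--
--     return primes
--
-- def waiter(number, q):
--     # Write your code here
--     primes = prime_numbers(10000)
--     answer = []
--
--     for i in range(q):
--         repeat = []
--         done = []
--
--         while number:
--             num = number.pop()
--
--             if num % primes[i] == 0: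
--                 done.append(num)
--             else:
--                 repeat.append(num)
--
--
--         number = repeat[:]
--         answer.extend(done[::-1])
--
--     answer.extend(number[::-1])
--     return answer
-- ===== SOURCE B (Python) =====
-- def prime_numbers(n):
--     primes = []
--     non_primes = set()
--
--     for i in range(2, n + 1):
--         if i not in non_primes:
--             primes.append(i)
--             for j in range(1, n + 1):
--                 if i * j > n:
--                     break
--                 non_primes.add(i * j)
--
--     return primes
--
-- def waiter(number, q):
--     # Orientation-flag reformulation: no popping, no per-round list rebuilds in
--     # reverse.  The kept plates stay in one fixed order; only the direction in
--     # which a round's divisible plates are emitted alternates each round.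
--     primes = prime_numbers(10000)
--     answer = []
--     seq = list(number)
--     fwd = True
--     for i in range(q):
--         if not seq:
--             break
--         p = primes[i]
--         if fwd:
--             answer += [x for x in seq if x % p == 0]
--         else:
--             answer += [x for x in seq[::-1] if x % p == 0]
--         seq = [x for x in seq if x % p != 0]
--         fwd = not fwd
--     answer += seq[::-1] if fwd else seq
--     return answer
-- ===== Notes on version B (the rewrite author's own statement) =====
-- stated objective: alternative
-- what changed: The pop-the-stack simulation (pop every plate each round into done/repeat and rebuild the stack from reversed slices) is replaced by an orientation-flag loop: the kept plates stay in one fixed-order list, each round emits the divisible plates by filtering that list in an alternating direction and keeps the rest with a single filter, breaking early once no plates remain; the prime table is kept as in A.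
import Mathlib
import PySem

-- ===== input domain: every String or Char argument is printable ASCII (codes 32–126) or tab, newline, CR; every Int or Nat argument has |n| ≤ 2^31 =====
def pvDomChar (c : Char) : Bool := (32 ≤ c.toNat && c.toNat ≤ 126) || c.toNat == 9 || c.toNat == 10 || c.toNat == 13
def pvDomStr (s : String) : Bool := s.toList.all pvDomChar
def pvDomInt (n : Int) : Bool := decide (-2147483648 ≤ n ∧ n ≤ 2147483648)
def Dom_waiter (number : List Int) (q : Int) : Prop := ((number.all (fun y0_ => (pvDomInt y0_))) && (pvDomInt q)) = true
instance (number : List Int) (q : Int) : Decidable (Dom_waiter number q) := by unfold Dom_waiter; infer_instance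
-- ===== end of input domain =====

-- B replaces A's pop-the-stack round simulation by an orientation-flag loop over a
-- fixed-order list (one alternating-direction filter per round, early break on empty);
-- same prime table, same results. A pops `number` in place in Python; equivalence here
-- is about the return value (B does not mutate its argument).


-- ===== PORT A =====
-- prime_numbers: inner `for j … break` loop
def pvSieveInner (i n : Int) : List Int → PySem.Set Int → PySem.Set Int
  | [], np => np
  | j :: rest, np =>
    if i * j > n then np else pvSieveInner i n rest (PySem.Set.add np (i * j))

-- prime_numbers: outer `for i in range(2, n+1)` loop
def pvSieveLoop (n : Int) : List Int → List Int → PySem.Set Int → List Int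
  | [], primes, _ => primes
  | i :: rest, primes, np =>
    if PySem.Set.contains np i then pvSieveLoop n rest primes np
    else pvSieveLoop n rest (primes ++ [i]) (pvSieveInner i n (PySem.List.pyRange 1 (n + 1) 1) np)

def primeNumbers (n : Int) : List Int :=
  pvSieveLoop n (PySem.List.pyRange 2 (n + 1) 1) [] PySem.Set.empty

-- the `while number:` loop; Python pops from the END, so the loop consumes the plates
-- in reversed order: it is ported as recursion over `number.reverse` (the pop sequence)
def pvPopLoop (p : Int) : List Int → List Int → List Int → List Int × List Int
  | [], done, rep => (done, rep)
  | num :: rest, done, rep =>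
    if PySem.Int.mod num p = 0 then pvPopLoop p rest (done ++ [num]) rep
    else pvPopLoop p rest done (rep ++ [num])

-- the `for i in range(q)` loop, state (number, answer); `primes[i]` out of range is a
-- Python IndexError (excluded by Pre_waiter when the stack is nonempty): the port skips
def pvRoundsA (primes : List Int) : List Int → List Int → List Int → List Int × List Int
  | [], number, answer => (number, answer)
  | i :: rest, number, answer =>
    match PySem.List.pyGet? primes i with
    | none => pvRoundsA primes rest number answer
    | some p =>
      let dr := pvPopLoop p number.reverse [] []
      pvRoundsA primes rest dr.2 (answer ++ dr.1.reverse)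

def waiter (number : List Int) (q : Int) : List Int :=
  let primes := primeNumbers 10000
  let st := pvRoundsA primes (PySem.List.pyRange 0 q 1) number []
  st.2 ++ st.1.reverse

-- ===== PORT B =====
-- Source B's `for i in range(q)` loop with state (seq, fwd, answer); `break` returns the
-- final `answer += seq[::-1] if fwd else seq` directly; on a `primes[i]` IndexError
-- (excluded by Pre_waiter) the port skips, like A's
def pvRoundsB (primes : List Int) : List Int → List Int → Bool → List Int → List Int
  | [], seq, fwd, answer => answer ++ (if fwd then seq.reverse else seq)
  | i :: rest, seq, fwd, answer =>
    if seq = [] then answer ++ (if fwd then seq.reverse else seq)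
    else
      match PySem.List.pyGet? primes i with
      | none => pvRoundsB primes rest seq fwd answer
      | some p =>
        pvRoundsB primes rest (seq.filter (fun x => ¬ PySem.Int.mod x p = 0)) (!fwd)
          (answer ++ (if fwd then seq else seq.reverse).filter (fun x => PySem.Int.mod x p = 0))

def waiter_alt (number : List Int) (q : Int) : List Int :=
  pvRoundsB (primeNumbers 10000) (PySem.List.pyRange 0 q 1) number true []

-- ===== PRECONDITION & SPEC =====
-- Python A raises IndexError exactly when q > 1229 (the number of primes below 10000)
-- and some plate survives all 1229 rounds, i.e. has no divisor in 2..10000; Pre_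
-- excludes exactly those inputs (B raises there too).
def Pre_waiter (number : List Int) (q : Int) : Prop :=
  q ≤ 1229 ∨ ∀ x ∈ number, ∃ d ∈ List.range' 2 9999, x % (d : Int) = 0
instance (number : List Int) (q : Int) : Decidable (Pre_waiter number q) := by
  unfold Pre_waiter; infer_instance
def pvWitness_waiter : List Int × Int := ([4, 6, 35], 3)

def Spec_waiter (number : List Int) (q : Int) (out : List Int) : Prop := out = waiter_alt number q
instance (number : List Int) (q : Int) (out : List Int) : Decidable (Spec_waiter number q out) := by unfold Spec_waiter; infer_instance

-- ===== CLAIM (what is proved, stated in full; the proofs are below) =====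
def Claim_equal_waiter : Prop := ∀ (number : List Int) (q : Int), Dom_waiter number q → Pre_waiter number q → Spec_waiter number q (waiter number q)

-- ===== LEMMAS AND PROOFS =====

-- the pop loop is a partition: done collects the divisible, rep the rest, in pop order
theorem pvPopLoop_eq (p : Int) (s done rep : List Int) :
    pvPopLoop p s done rep =
      (done ++ s.filter (fun x => decide (PySem.Int.mod x p = 0)),
       rep ++ s.filter (fun x => !decide (PySem.Int.mod x p = 0))) := by
  induction s generalizing done rep with
  | nil => simp [pvPopLoop]
  | cons num rest ih =>
    by_cases h : PySem.Int.mod num p = 0 <;>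
      simp [pvPopLoop, h, ih]

-- once the stack is empty, every remaining round of A is a no-op
theorem pvRoundsA_nil (primes is : List Int) (answer : List Int) :
    pvRoundsA primes is [] answer = ([], answer) := by
  induction is generalizing answer with
  | nil => rfl
  | cons i rest ih =>
    cases h : PySem.List.pyGet? primes i with
    | none => simp [pvRoundsA, h, ih]
    | some p => simp [pvRoundsA, h, pvPopLoop_eq, ih]

-- round correspondence: A's stack is B's fixed-order list, read forwards or backwards
theorem pvRounds_corr (primes is : List Int) (seq answer : List Int) (fwd : Bool) :
    (pvRoundsA primes is (if fwd then seq else seq.reverse) answer).2 ++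
      (pvRoundsA primes is (if fwd then seq else seq.reverse) answer).1.reverse =
    pvRoundsB primes is seq fwd answer := by
  induction is generalizing seq answer fwd with
  | nil => cases fwd <;> simp [pvRoundsA, pvRoundsB]
  | cons i rest ih =>
    by_cases hseq : seq = []
    · subst hseq
      cases h : PySem.List.pyGet? primes i with
      | none =>
        cases fwd <;>
          simp [pvRoundsA, pvRoundsB, h, pvRoundsA_nil primes rest answer]
      | some p =>
        cases fwd <;>
          simp [pvRoundsA, pvRoundsB, h, pvPopLoop_eq, pvRoundsA_nil primes rest answer]
    · cases h : PySem.List.pyGet? primes i with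
      | none =>
        cases fwd with
        | false => simpa [pvRoundsA, pvRoundsB, hseq, h] using ih seq answer false
        | true => simpa [pvRoundsA, pvRoundsB, hseq, h] using ih seq answer true
      | some p =>
        cases fwd with
        | false =>
          have := ih (seq.filter (fun x => ¬ PySem.Int.mod x p = 0)) (answer ++
              seq.reverse.filter (fun x => PySem.Int.mod x p = 0)) true
          simpa [pvRoundsA, pvRoundsB, hseq, h, pvPopLoop_eq,
            List.filter_reverse] using this
        | true =>
          have := ih (seq.filter (fun x => ¬ PySem.Int.mod x p = 0)) (answer ++
              seq.filter (fun x => PySem.Int.mod x p = 0)) false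
          simpa [pvRoundsA, pvRoundsB, hseq, h, pvPopLoop_eq,
            List.filter_reverse] using this

-- ===== VERDICT (by name: the statement is the Claim_ definition above) =====
theorem waiter_spec : Claim_equal_waiter := by
  intro number q _ _
  unfold Spec_waiter waiter waiter_alt
  simpa using pvRounds_corr (primeNumbers 10000) (PySem.List.pyRange 0 q 1) number [] true
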